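-- pv_equiv track=rewrite | github.com/njriasan/SPOOKY-KOBUKI-KART | rpi_ble/buttons.py | _validate_bit_list
-- ===== SOURCE A (Python) =====
-- def _validate_bit_list(bit_list, max_byte):
--     # Check that we passed in a non-zero len list
--     assert(isinstance(bit_list, list))
--     assert(len(bit_list) > 0)
--     bit_set = set()
--     # Check that every bit is an int
--     # and is unique
--     for i in bit_list:
--         assert(type(i) == int)
--         bit_set.add (i)
--     assert(len(bit_set) == len(bit_list))
--     # Check that all bits are in the same byte
--     byte_list = [i // 8 for i in bit_list]
--     # Select the byte referred to
--     byte_num = byte_list[0]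
--     # Make sure we are within the first 12 bytes
--     assert (0 <= byte_num <= max_byte)
--     for i in byte_list[1:]:
--         assert(i == byte_num)
--     # Check that all bits are contiguous. We don't care about
--     # the order given.
--     ones_list = [7 - (bit_val % 8) for bit_val in bit_list]
--     ones_list.sort(reverse=True)
--     assert (len(ones_list) == (ones_list[0] - ones_list[-1] + 1))
--     # Select our shift value
--     shift_value = ones_list[-1]
--     # Construct our mask
--     mask = 0
--     for on_bit in ones_list:
--         mask += (1 << on_bit)
--     return byte_num, mask, shift_value
-- ===== SOURCE B (Python) =====
-- def _validate_bit_list(bit_list, max_byte):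
--     # Simpler: min/max of the bit positions + a closed-form mask, no sort, no loop.
--     assert isinstance(bit_list, list)
--     n = len(bit_list)
--     assert n > 0
--     assert all(type(b) == int for b in bit_list)
--     assert len(set(bit_list)) == n
--     byte_num = bit_list[0] // 8
--     assert 0 <= byte_num <= max_byte
--     assert all(b // 8 == byte_num for b in bit_list[1:])
--     rems = [b % 8 for b in bit_list]
--     lo = 7 - max(rems)
--     hi = 7 - min(rems)
--     assert n == hi - lo + 1
--     return byte_num, ((1 << n) - 1) << lo, lo
-- ===== Notes on version B (the rewrite author's own statement) =====
-- stated objective: simpler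
-- what changed: B drops A's sort and mask-accumulation loop: contiguity is checked with min/max of the bit remainders and the mask is built in closed form as ((1<<n)-1)<<lo.
import Mathlib
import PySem

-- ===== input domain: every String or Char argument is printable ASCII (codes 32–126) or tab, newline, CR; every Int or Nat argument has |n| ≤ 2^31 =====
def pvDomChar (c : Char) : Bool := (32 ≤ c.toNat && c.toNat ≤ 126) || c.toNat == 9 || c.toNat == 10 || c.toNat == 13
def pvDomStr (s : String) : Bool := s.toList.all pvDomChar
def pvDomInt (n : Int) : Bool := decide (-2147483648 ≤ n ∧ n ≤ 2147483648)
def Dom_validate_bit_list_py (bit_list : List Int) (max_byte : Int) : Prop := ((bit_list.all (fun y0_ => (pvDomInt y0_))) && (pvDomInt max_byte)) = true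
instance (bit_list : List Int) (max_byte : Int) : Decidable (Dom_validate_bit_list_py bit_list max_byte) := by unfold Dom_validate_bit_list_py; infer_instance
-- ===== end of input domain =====

-- B replaces A's sort + mask-accumulation loop by min/max of the remainders and a
-- closed-form mask ((1<<n)-1)<<lo; equivalence is proved on the inputs where A's asserts pass.

-- ===== PORT A =====
-- Each failing 'assert' (raise) returns the junk value (0,0,0); Pre_ excludes those inputs.
-- '1 << on_bit' is ported as '1 <<< on_bit.toNat' — exact here since on_bit = 7 - (b % 8) ≥ 0.
def validate_bit_list_py (bit_list : List Int) (max_byte : Int) : Int × Int × Int :=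
  match bit_list with
  | [] => (0, 0, 0)
  | b0 :: rest =>
    let bit_set := PySem.Set.ofList (b0 :: rest)
    if bit_set.length = (b0 :: rest).length then
      let byte_list := (b0 :: rest).map (fun i => PySem.Int.floordiv i 8)
      let byte_num := byte_list.headD 0
      if 0 ≤ byte_num ∧ byte_num ≤ max_byte then
        if (byte_list.drop 1).all (fun i => decide (i = byte_num)) then
          let ones_list := (b0 :: rest).map (fun bv => 7 - PySem.Int.mod bv 8)
          let s := PySem.List.sorted ones_list (fun x => x) true
          if (s.length : Int) = s.headD 0 - s.getLastD 0 + 1 then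
            let shift_value := s.getLastD 0
            let mask := s.foldl (fun m on_bit => m + ((1 : Int) <<< on_bit.toNat)) 0
            (byte_num, mask, shift_value)
          else (0, 0, 0)
        else (0, 0, 0)
      else (0, 0, 0)
    else (0, 0, 0)

-- ===== PORT B =====
def validate_bit_list_py_alt (bit_list : List Int) (max_byte : Int) : Int × Int × Int :=
  match bit_list with
  | [] => (0, 0, 0)
  | b0 :: rest =>
    if (PySem.Set.ofList (b0 :: rest)).length = (b0 :: rest).length then
      let byte_num := PySem.Int.floordiv b0 8
      if 0 ≤ byte_num ∧ byte_num ≤ max_byte then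
        if rest.all (fun bv => decide (PySem.Int.floordiv bv 8 = byte_num)) then
          let rems := (b0 :: rest).map (fun bv => PySem.Int.mod bv 8)
          let lo := 7 - ((PySem.List.max? rems (fun x => x)).getD 0)
          let hi := 7 - ((PySem.List.min? rems (fun x => x)).getD 0)
          if ((b0 :: rest).length : Int) = hi - lo + 1 then
            (byte_num, (((1 : Int) <<< (b0 :: rest).length) - 1) <<< lo.toNat, lo)
          else (0, 0, 0)
        else (0, 0, 0)
      else (0, 0, 0)
    else (0, 0, 0)

-- ===== PRECONDITION & SPEC =====
-- Pre_ = exactly the inputs where A's asserts all pass (A raises AssertionError elsewhere):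
-- nonempty, no duplicate bits, first byte in [0, max_byte], all bits in that byte, contiguous positions.
def Pre_validate_bit_list_py (bit_list : List Int) (max_byte : Int) : Prop :=
  bit_list ≠ [] ∧ bit_list.Nodup ∧
  0 ≤ PySem.Int.floordiv (bit_list.headD 0) 8 ∧
  PySem.Int.floordiv (bit_list.headD 0) 8 ≤ max_byte ∧
  (∀ b ∈ bit_list, PySem.Int.floordiv b 8 = PySem.Int.floordiv (bit_list.headD 0) 8) ∧
  (bit_list.length : Int) =
    ((bit_list.map (fun bv => PySem.Int.mod bv 8)).foldl max 0)
    - ((bit_list.map (fun bv => PySem.Int.mod bv 8)).foldl min 7) + 1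

instance (bit_list : List Int) (max_byte : Int) : Decidable (Pre_validate_bit_list_py bit_list max_byte) := by
  unfold Pre_validate_bit_list_py; infer_instance

def pvWitness_validate_bit_list_py : List Int × Int := ([9, 8, 10], 1)

def Spec_validate_bit_list_py (bit_list : List Int) (max_byte : Int) (out : Int × Int × Int) : Prop := out = validate_bit_list_py_alt bit_list max_byte
instance (bit_list : List Int) (max_byte : Int) (out : Int × Int × Int) : Decidable (Spec_validate_bit_list_py bit_list max_byte out) := by unfold Spec_validate_bit_list_py; infer_instance

-- ===== CLAIM (what is proved, stated in full; the proofs are below) =====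
def Claim_equal_validate_bit_list_py : Prop := ∀ (bit_list : List Int) (max_byte : Int), Dom_validate_bit_list_py bit_list max_byte → Pre_validate_bit_list_py bit_list max_byte → Spec_validate_bit_list_py bit_list max_byte (validate_bit_list_py bit_list max_byte)

-- ===== LEMMAS AND PROOFS =====

theorem pv_ofList_len {α : Type} [BEq α] [LawfulBEq α] (xs : List α) (h : xs.Nodup) :
    (PySem.Set.ofList xs : List α).length = xs.length :=
  List.Perm.length_eq ((List.perm_ext_iff_of_nodup (PySem.Set.nodup_ofList xs) h).2
    (PySem.Set.mem_ofList xs))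

theorem pv_foldl_shift (l : List Int) (c : Int) :
    l.foldl (fun m k => m + (1 : Int) <<< k.toNat) c
      = c + (l.map (fun k => (1 : Int) <<< k.toNat)).sum := by
  induction l generalizing c with
  | nil => simp
  | cons x t ih => rw [List.foldl_cons, List.map_cons, List.sum_cons, ih, add_assoc]

theorem pv_sum_pows (h : Int) (n : Nat) (h0 : 0 ≤ h - (n : Int) + 1) :
    ((List.range n).map (fun i : Nat => (2 : Int) ^ ((h - (i : Int)).toNat))).sum
      = (2 ^ n - 1) * 2 ^ ((h - (n : Int) + 1).toNat) := by
  revert h0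
  induction n with
  | zero => intro _; simp
  | succ k ih =>
    intro h0
    have hk : (0 : Int) ≤ h - (k : Int) := by push_cast at h0; omega
    rw [List.range_succ, List.map_append, List.sum_append, ih (by omega)]
    simp only [List.map_cons, List.map_nil, List.sum_cons, List.sum_nil, add_zero]
    have e1 : (h - (k : Int) + 1).toNat = (h - (k : Int)).toNat + 1 := by omega
    have e2 : (h - ((k + 1 : Nat) : Int) + 1).toNat = (h - (k : Int)).toNat := by
      push_cast; omega
    rw [e1, e2, pow_succ, pow_succ]
    ring

theorem validate_bit_list_py_spec : Claim_equal_validate_bit_list_py := by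
  intro bit_list max_byte _ hpre
  unfold Spec_validate_bit_list_py
  obtain ⟨hne, hnd, hge, hle, hsame, hlen⟩ := hpre
  obtain ⟨b0, rest, rfl⟩ : ∃ b0 rest, bit_list = b0 :: rest := by
    cases bit_list with
    | nil => exact absurd rfl hne
    | cons a t => exact ⟨a, t, rfl⟩
  simp only [List.headD_cons] at hge hle hsame hlen
  -- remainders
  set r0 : Int := PySem.Int.mod b0 8 with hr0def
  set rt : List Int := rest.map (fun bv => PySem.Int.mod bv 8) with hrtdef
  have hrems : (b0 :: rest).map (fun bv => PySem.Int.mod bv 8) = r0 :: rt := by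
    simp [hr0def, hrtdef]
  have hbnd : ∀ r ∈ r0 :: rt, 0 ≤ r ∧ r < 8 := by
    intro r hr
    rcases List.mem_cons.1 hr with h | h
    · exact h ▸ ⟨PySem.Int.mod_nonneg b0 (by norm_num), PySem.Int.mod_lt b0 (by norm_num)⟩
    · obtain ⟨b, _, rfl⟩ := List.mem_map.1 (hrtdef ▸ h)
      exact ⟨PySem.Int.mod_nonneg b (by norm_num), PySem.Int.mod_lt b (by norm_num)⟩
  set M : Int := rt.foldl max r0 with hMdef
  set m : Int := rt.foldl min r0 with hmdef
  have hmax : PySem.List.max? (r0 :: rt) (fun y => y) = some M := PySem.List.max?_id_cons r0 rt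
  have hmin : PySem.List.min? (r0 :: rt) (fun y => y) = some m := PySem.List.min?_id_cons r0 rt
  have hMmem : M ∈ r0 :: rt := PySem.List.max?_mem hmax
  have hmmem : m ∈ r0 :: rt := PySem.List.min?_mem hmin
  have hMmax : ∀ r ∈ r0 :: rt, r ≤ M := PySem.List.max?_isMax hmax
  have hmmin : ∀ r ∈ r0 :: rt, m ≤ r := PySem.List.min?_isMin hmin
  have hM7 : M ≤ 7 := by have := (hbnd M hMmem).2; omega
  have hm0 : 0 ≤ m := (hbnd m hmmem).1
  -- the Pre_ foldl expressions are M and m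
  have hfold_max : ((b0 :: rest).map (fun bv => PySem.Int.mod bv 8)).foldl max 0 = M := by
    rw [hrems]
    simp only [List.foldl_cons, max_eq_right (hbnd r0 (List.mem_cons_self)).1, hMdef]
  have hfold_min : ((b0 :: rest).map (fun bv => PySem.Int.mod bv 8)).foldl min 7 = m := by
    rw [hrems]
    have : min 7 r0 = r0 := min_eq_right (by have := (hbnd r0 (List.mem_cons_self)).2; omega)
    simp only [List.foldl_cons, this, hmdef]
  rw [hfold_max, hfold_min] at hlen
  -- abbreviations
  set n : Nat := (b0 :: rest).length with hndef
  have hnpos : 1 ≤ n := by simp [hndef]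
  set lo : Int := 7 - M with hlodef
  set hi : Int := 7 - m with hhidef
  have hlo0 : 0 ≤ lo := by omega
  have hnint : (n : Int) = hi - lo + 1 := by omega
  -- the ones list and its descending enumeration
  set ones : List Int := (b0 :: rest).map (fun bv => 7 - PySem.Int.mod bv 8) with honesdef
  have hones_rems : ones = (r0 :: rt).map (fun r => 7 - r) := by
    rw [honesdef, ← hrems, List.map_map]; rfl
  have hones_len : ones.length = n := by simp [honesdef, hndef]
  have hones_nd : ones.Nodup := by
    refine List.Nodup.map_on ?_ hnd
    intro x hx y hy hxy
    have hdx := hsame x hx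
    have hdy := hsame y hy
    have ex := PySem.Int.floordiv_mul_add_mod x 8
    have ey := PySem.Int.floordiv_mul_add_mod y 8
    have : PySem.Int.mod x 8 = PySem.Int.mod y 8 := by omega
    omega
  set ds : List Int := (List.range n).map (fun i : Nat => hi - (i : Int)) with hdsdef
  have hds_len : ds.length = n := by simp [hdsdef]
  have hds_pw : ds.Pairwise (fun a b => b < a) := by
    refine List.Pairwise.map _ ?_ List.pairwise_lt_range
    intro a b hab
    have : (a : Int) < (b : Int) := by exact_mod_cast hab
    omega
  have hds_nd : ds.Nodup := hds_pw.imp (fun h => by omega)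
  have hsub : ones ⊆ ds := by
    intro v hv
    obtain ⟨r, hr, rfl⟩ := List.mem_map.1 (hones_rems ▸ hv)
    have h1 := hMmax r hr
    have h2 := hmmin r hr
    refine List.mem_map.2 ⟨(hi - (7 - r)).toNat, List.mem_range.2 ?_, ?_⟩
    · omega
    · have : ((hi - (7 - r)).toNat : Int) = hi - (7 - r) := by omega
      omega
  have hperm : ds.Perm ones :=
    ((List.subperm_of_subset hones_nd hsub).perm_of_length_le (by omega)).symm
  have hsorted : PySem.List.sorted ones (fun x => x) true = ds :=
    PySem.List.sorted_rev_eq_of_perm_of_pairwise_gt ones ds (fun x => x) hperm hds_pw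
  -- head / last of ds
  obtain ⟨k, hk⟩ : ∃ k, n = k + 1 := ⟨n - 1, by omega⟩
  have hhead : ds.headD 0 = hi := by
    rw [hdsdef, hk, List.range_succ_eq_map]
    simp
  have hlast : ds.getLastD 0 = lo := by
    rw [hdsdef, hk, List.range_succ, List.map_append]
    simp only [List.map_cons, List.map_nil]
    rw [List.getLastD_concat]
    have : (k : Int) = hi - lo := by push_cast at hnint ⊢; omega
    omega
  -- the mask
  have hmaskA : ds.foldl (fun mk on_bit => mk + (1 : Int) <<< on_bit.toNat) 0
      = (2 ^ n - 1) * 2 ^ lo.toNat := by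
    rw [pv_foldl_shift, zero_add, hdsdef, List.map_map]
    have heq : ((fun k => (1 : Int) <<< k.toNat) ∘ fun i : Nat => hi - (i : Int))
        = fun i : Nat => (2 : Int) ^ ((hi - (i : Int)).toNat) := by
      funext i
      simp only [Function.comp]
      rw [Int.shiftLeft_eq_mul_pow, one_mul]
      norm_cast
    rw [heq, pv_sum_pows hi n (by omega)]
    have : (hi - (n : Int) + 1) = lo := by omega
    rw [this]
  have hmaskB : (((1 : Int) <<< n) - 1) <<< lo.toNat = (2 ^ n - 1) * 2 ^ lo.toNat := by
    simp [Int.shiftLeft_eq]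
  -- evaluate port A
  have hset : (PySem.Set.ofList (b0 :: rest) : List Int).length = (b0 :: rest).length :=
    pv_ofList_len _ hnd
  have hbl_head : ((b0 :: rest).map (fun i => PySem.Int.floordiv i 8)).headD 0
      = PySem.Int.floordiv b0 8 := by simp
  have hall : ∀ i ∈ ((b0 :: rest).map (fun i => PySem.Int.floordiv i 8)).drop 1,
      i = PySem.Int.floordiv b0 8 := by
    intro i hi'
    simp only [List.map_cons, List.drop_succ_cons, List.drop_zero] at hi'
    obtain ⟨b, hb, rfl⟩ := List.mem_map.1 hi'
    exact hsame b (List.mem_cons_of_mem _ hb)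
  have hallA : (((b0 :: rest).map (fun i => PySem.Int.floordiv i 8)).drop 1).all
      (fun i => decide (i = PySem.Int.floordiv b0 8)) = true := by
    rw [List.all_eq_true]
    exact fun i hi' => decide_eq_true (hall i hi')
  have hallB : (rest.all fun bv => decide (PySem.Int.floordiv bv 8 = PySem.Int.floordiv b0 8))
      = true := by
    rw [List.all_eq_true]
    exact fun b hb => decide_eq_true (hsame b (List.mem_cons_of_mem _ hb))
  simp only [validate_bit_list_py, validate_bit_list_py_alt]
  rw [if_pos hset, if_pos hset, hbl_head]
  rw [if_pos (show (0 ≤ PySem.Int.floordiv b0 8 ∧ PySem.Int.floordiv b0 8 ≤ max_byte)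
    from ⟨hge, hle⟩)]
  rw [if_pos (show (0 ≤ PySem.Int.floordiv b0 8 ∧ PySem.Int.floordiv b0 8 ≤ max_byte)
    from ⟨hge, hle⟩)]
  rw [if_pos hallA, if_pos hallB]
  rw [← honesdef, hsorted, hhead, hlast, hds_len, ← hndef]
  rw [if_pos hnint]
  rw [hrems, hmax, hmin]
  simp only [Option.getD_some]
  rw [if_pos (show (n : Int) = 7 - m - (7 - M) + 1 by omega)]
  rw [← hlodef, hmaskA, hmaskB]
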